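-- pv_equiv track=rewrite | github.com/pypi-data/pypi-mirror-259 | packages/mhelper/mhelper-1.0.1.437.tar.gz/mhelper-1.0.1.437/mhelper/array_helper.py | when_first_or_last
-- ===== SOURCE A (Python) =====
-- from typing import List, Optional, Iterator, overload, Tuple, Dict, Iterable, Union, TypeVar, Callable, Sequence, Type, Collection, Reversible, Generic, Set
--
-- T = TypeVar( "T" )
--
-- def when_first_or_last( iterable: Iterable[T] ) -> (T, bool, bool):
--     """
--     Like `enumerate`, returning the tuple: (enumerator), (is first element), (is last element).
--     """
--     is_first = True
--     last_item = None
--     has_yielded_first = True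
--
--     for item in iterable:
--         if not is_first:
--             yield last_item, has_yielded_first, False
--             has_yielded_first = False
--         else:
--             is_first = False
--
--         last_item = item
--
--     if not is_first:
--         yield last_item, has_yielded_first, True
-- ===== SOURCE B (Python) =====
-- def when_first_or_last(iterable):
--     items = list(iterable)
--     n = len(items)
--     for i, item in enumerate(items):
--         yield item, i == 0, i == n - 1
-- ===== Notes on version B (the rewrite author's own statement) =====
-- stated objective: simpler
-- what changed: Replaces A's one-item-lookahead delayed-yield state machine (is_first/last_item/has_yielded_first) with materializing the list once and yielding each item with index comparisons i == 0 and i == n - 1.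
import Mathlib
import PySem

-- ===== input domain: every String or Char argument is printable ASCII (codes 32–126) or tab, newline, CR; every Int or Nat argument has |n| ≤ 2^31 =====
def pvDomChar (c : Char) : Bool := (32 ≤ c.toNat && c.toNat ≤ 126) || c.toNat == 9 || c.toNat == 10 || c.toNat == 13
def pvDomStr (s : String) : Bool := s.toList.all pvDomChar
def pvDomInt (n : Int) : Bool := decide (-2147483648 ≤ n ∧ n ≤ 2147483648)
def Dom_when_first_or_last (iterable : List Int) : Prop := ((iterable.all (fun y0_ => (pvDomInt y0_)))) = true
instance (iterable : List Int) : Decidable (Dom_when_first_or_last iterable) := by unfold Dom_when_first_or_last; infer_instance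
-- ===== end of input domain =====

-- B materializes the iterable and tags each item by index comparison (i == 0, i == n-1)
-- instead of A's delayed-yield lookahead state machine; same yielded values on every
-- finite input (B consumes the iterable eagerly, a difference only for lazy iterators).

-- ===== PORT A =====
-- A's loop state: is_first, last_item (None until the first iteration and only read
-- after it, so Option with getD 0 for the never-read default is exact), has_yielded_first.
def wfolLoop : List Int → Bool → Option Int → Bool → List (Int × Bool × Bool)
  | [], is_first, last_item, hyf =>
      if is_first = false then [(last_item.getD 0, hyf, true)] else []
  | item :: rest, is_first, last_item, hyf =>
      if is_first = false then
        (last_item.getD 0, hyf, false) :: wfolLoop rest is_first (some item) false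
      else
        wfolLoop rest false (some item) hyf

def when_first_or_last (iterable : List Int) : List (Int × Bool × Bool) :=
  wfolLoop iterable true none true

-- ===== PORT B =====
def when_first_or_last_alt (iterable : List Int) : List (Int × Bool × Bool) :=
  let items := iterable
  let n : Int := items.length
  (PySem.List.enumerate items).map (fun q => (q.2, decide (q.1 = 0), decide (q.1 = n - 1)))

-- ===== PRECONDITION & SPEC =====
def Spec_when_first_or_last (iterable : List Int) (out : List (Int × Bool × Bool)) : Prop := out = when_first_or_last_alt iterable
instance (iterable : List Int) (out : List (Int × Bool × Bool)) : Decidable (Spec_when_first_or_last iterable out) := by unfold Spec_when_first_or_last; infer_instance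

-- ===== CLAIM (what is proved, stated in full; the proofs are below) =====
def Claim_equal_when_first_or_last : Prop := ∀ (iterable : List Int), Dom_when_first_or_last iterable → Spec_when_first_or_last iterable (when_first_or_last iterable)

-- ===== LEMMAS AND PROOFS =====

-- After the first iteration A's loop carries is_first = false and last_item = some p;
-- it then emits p (with the pending has_yielded_first flag, and last-flag true iff the
-- remainder is empty) followed by the remainder tagged like B's enumerate-map starting
-- at index s ≥ 1, whose last index is s + |xs| - 1.
theorem wfolLoop_char (xs : List Int) : ∀ (s : Int) (p : Int) (h : Bool), 1 ≤ s →
    wfolLoop xs false (some p) h =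
      (p, h, decide (xs = [])) ::
        (PySem.List.enumerate xs s).map
          (fun q => (q.2, decide (q.1 = 0), decide (q.1 = s + xs.length - 1))) := by
  induction xs with
  | nil => intro s p h hs; simp [wfolLoop]
  | cons x rest ih =>
    intro s p h hs
    rw [wfolLoop, PySem.List.enumerate_cons]
    simp only [List.map_cons, ih (s + 1) x false (by omega), Option.getD_some]
    have e1 : decide (s = 0) = false := by simp; omega
    have e2 : (s : Int) + ((x :: rest).length : Int) - 1 = s + 1 + (rest.length : Int) - 1 := by
      simp; ring
    have e3 : decide (s = s + 1 + (rest.length : Int) - 1) = decide (rest = []) := by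
      rcases rest with _ | ⟨y, ys⟩
      · simp
      · simp
        omega
    simp only [if_true, e2, e1, e3]
    simp

-- ===== VERDICT (by name: the statement is the Claim_ definition above) =====
theorem when_first_or_last_spec : Claim_equal_when_first_or_last := by
  intro iterable _
  unfold Spec_when_first_or_last
  simp only [when_first_or_last, when_first_or_last_alt]
  rcases iterable with _ | ⟨p, xs⟩
  · simp [wfolLoop]
  · rw [wfolLoop, if_neg (by simp), wfolLoop_char xs 1 p true (by omega), PySem.List.enumerate_cons]
    have e2 : ((p :: xs).length : Int) - 1 = 1 + (xs.length : Int) - 1 := by simp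
    have e3 : decide ((0:Int) = 1 + (xs.length : Int) - 1) = decide (xs = []) := by
      rcases xs with _ | ⟨y, ys⟩
      · simp
      · simp
        omega
    simp only [List.map_cons, e2, e3]
    simp
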